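-- pv_equiv track=rewrite | github.com/stephenbmchugh-neuroscience/neuron_2024_repro | src/smCofiringFunctions.py | adjust_sessions
-- ===== SOURCE A (Python) =====
-- def adjust_sessions(sessions):
--     '''
--
--     '''
--     odata = []
--     sessions = [x.replace(" ","") for x in sessions]
--     try: sessions.remove('f1a2')
--     except: pass
--     for sindx,sess in enumerate(sessions):
--         if 'stim' in sess: sess = sess[:2]
--         odata.append(sess)
--
--     return odata
-- ===== SOURCE B (Python) =====
-- def adjust_sessions(sessions):
--     out = []
--     removed = False
--     for x in sessions:
--         s = x.replace(" ", "")
--         if not removed and s == 'f1a2':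
--             removed = True
--             continue
--         if 'stim' in s:
--             s = s[:2]
--         out.append(s)
--     return out
-- ===== Notes on version B (the rewrite author's own statement) =====
-- stated objective: simpler
-- what changed: Fuses A's three passes (strip-spaces comprehension, list.remove of the first 'f1a2', and the truncation loop) into one single traversal that builds the output directly, tracking first-removal with a boolean flag.
import Mathlib
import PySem

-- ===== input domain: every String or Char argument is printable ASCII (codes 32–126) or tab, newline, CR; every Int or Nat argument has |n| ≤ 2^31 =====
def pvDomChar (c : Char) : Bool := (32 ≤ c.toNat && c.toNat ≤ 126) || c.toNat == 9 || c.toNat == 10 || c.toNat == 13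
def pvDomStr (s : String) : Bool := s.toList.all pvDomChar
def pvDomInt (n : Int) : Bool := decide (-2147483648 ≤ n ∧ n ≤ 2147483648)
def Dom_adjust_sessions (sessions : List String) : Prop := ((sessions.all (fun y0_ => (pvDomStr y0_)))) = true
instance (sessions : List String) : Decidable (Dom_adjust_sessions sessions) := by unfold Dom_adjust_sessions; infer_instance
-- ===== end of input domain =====

-- B fuses A's three passes (strip-spaces map, remove first 'f1a2', truncation loop) into one
-- single traversal with a removal flag; same return value, objective: simpler.

-- ===== PORT A =====
def adjust_sessions (sessions : List String) : List String :=
  let sessions1 := sessions.map (fun x => PySem.Str.replace x " " "")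
  let sessions2 :=
    match PySem.List.remove? sessions1 "f1a2" with   -- try: sessions.remove('f1a2') except: pass
    | some l => l
    | none => sessions1
  (PySem.List.enumerate sessions2).foldl (fun odata p =>
    let sess := p.2
    let sess := if PySem.Str.isIn "stim" sess then PySem.Str.slice sess none (some 2) else sess
    odata ++ [sess]) []

-- ===== PORT B =====
def adjust_sessions_go : List String → Bool → List String
  | [], _ => []
  | x :: rest, removed =>
    let s := PySem.Str.replace x " " ""
    if !removed && (s == "f1a2") then adjust_sessions_go rest true
    else (if PySem.Str.isIn "stim" s then PySem.Str.slice s none (some 2) else s) ::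
         adjust_sessions_go rest removed

def adjust_sessions_alt (sessions : List String) : List String :=
  adjust_sessions_go sessions false

-- ===== PRECONDITION & SPEC =====
def Spec_adjust_sessions (sessions : List String) (out : List String) : Prop := out = adjust_sessions_alt sessions
instance (sessions : List String) (out : List String) : Decidable (Spec_adjust_sessions sessions out) := by unfold Spec_adjust_sessions; infer_instance

-- ===== CLAIM (what is proved, stated in full; the proofs are below) =====
def Claim_equal_adjust_sessions : Prop := ∀ (sessions : List String), Dom_adjust_sessions sessions → Spec_adjust_sessions sessions (adjust_sessions sessions)

-- ===== LEMMAS AND PROOFS =====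

def pvTrunc (s : String) : String :=
  if PySem.Str.isIn "stim" s then PySem.Str.slice s none (some 2) else s

theorem adjust_sessions_go_true (l : List String) :
    adjust_sessions_go l true = (l.map (fun x => PySem.Str.replace x " " "")).map pvTrunc := by
  induction l with
  | nil => rfl
  | cons x rest ih => simp [adjust_sessions_go, ih, pvTrunc]

theorem adjust_sessions_go_false (l : List String) :
    adjust_sessions_go l false =
      (match PySem.List.remove? (l.map (fun x => PySem.Str.replace x " " "")) "f1a2" with
       | some m => m
       | none => l.map (fun x => PySem.Str.replace x " " "")).map pvTrunc := by
  induction l with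
  | nil => rfl
  | cons x rest ih =>
    by_cases h : PySem.Str.replace x " " "" = "f1a2"
    · simp [adjust_sessions_go, h, adjust_sessions_go_true, PySem.List.remove?_cons_self]
    · rw [List.map_cons, PySem.List.remove?_cons_of_ne _ h]
      simp only [adjust_sessions_go, h, beq_iff_eq, Bool.not_false, Bool.true_and]
      rw [if_neg (by simpa using h), ih]
      cases hr : PySem.List.remove? (rest.map (fun x => PySem.Str.replace x " " "")) "f1a2" <;>
        simp [pvTrunc]

-- ===== VERDICT (by name: the statement is the Claim_ definition above) =====
theorem adjust_sessions_spec : Claim_equal_adjust_sessions := by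
  intro sessions _
  unfold Spec_adjust_sessions adjust_sessions adjust_sessions_alt
  rw [adjust_sessions_go_false]
  have hfold : ∀ (l2 : List String),
      (PySem.List.enumerate l2).foldl (fun odata p =>
        odata ++ [if PySem.Str.isIn "stim" p.2 then PySem.Str.slice p.2 none (some 2) else p.2]) []
      = l2.map pvTrunc := by
    intro l2
    rw [PySem.List.foldl_append_singleton_eq_map]
    simp only [List.nil_append]
    rw [show ((PySem.List.enumerate l2).map fun p =>
        if PySem.Str.isIn "stim" p.2 then PySem.Str.slice p.2 none (some 2) else p.2)
      = ((PySem.List.enumerate l2).map (·.2)).map pvTrunc by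
        rw [List.map_map]; rfl]
    rw [PySem.List.map_snd_enumerate]
  cases hr : PySem.List.remove? (sessions.map (fun x => PySem.Str.replace x " " "")) "f1a2" <;>
    simp only [hr] <;> exact hfold _
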